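-- pv_equiv track=rewrite | github.com/mrc329/milan-olympics-chatbot | milan2026_pipeline.py | summarize_updates
-- ===== SOURCE A (Python) =====
-- def summarize_updates(updated_list: list[tuple[str, str]]) -> dict:
--     summary = {
--         "narratives":     [],
--         "rumors":         [],
--         "injuries":       [],
--         "athletes":       [],
--         "events":         [],
--         "upsets":         [],
--         "country_upsets": [],
--     }
--     for vid, action in updated_list:
--         record = f"{vid} ({action})"
--         if   vid.startswith("athlete::"):        summary["athletes"].append(record)
--         elif vid.startswith("event::"):          summary["events"].append(record)
--         elif vid.startswith("country_upset::"):  summary["country_upsets"].append(record)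
--         elif vid.startswith("upset::"):          summary["upsets"].append(record)
--         elif vid.startswith("rumor::"):          summary["rumors"].append(record)
--         elif vid.startswith("injury::"):         summary["injuries"].append(record)
--         else:                                    summary["narratives"].append(record)
--     return summary
-- ===== SOURCE B (Python) =====
-- def summarize_updates(updated_list: list[tuple[str, str]]) -> dict:
--     dispatch = {
--         "athlete":       "athletes",
--         "event":         "events",
--         "country_upset": "country_upsets",
--         "upset":         "upsets",
--         "rumor":         "rumors",
--         "injury":        "injuries",
--     }
--
--     def bucket(vid):
--         i = vid.find("::")
--         return dispatch.get(vid[:i], "narratives") if i >= 0 else "narratives"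
--
--     return {
--         key: [f"{vid} ({action})" for vid, action in updated_list if bucket(vid) == key]
--         for key in ["narratives", "rumors", "injuries",
--                     "athletes", "events", "upsets", "country_upsets"]
--     }
-- ===== Notes on version B (the rewrite author's own statement) =====
-- stated objective: alternative
-- what changed: A makes one pass with a six-branch startswith chain appending into a pre-built dict; B builds the dict by a per-bucket comprehension, classifying each vid once by locating its first '::' and looking the prefix token up in a dispatch table.
import Mathlib
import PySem

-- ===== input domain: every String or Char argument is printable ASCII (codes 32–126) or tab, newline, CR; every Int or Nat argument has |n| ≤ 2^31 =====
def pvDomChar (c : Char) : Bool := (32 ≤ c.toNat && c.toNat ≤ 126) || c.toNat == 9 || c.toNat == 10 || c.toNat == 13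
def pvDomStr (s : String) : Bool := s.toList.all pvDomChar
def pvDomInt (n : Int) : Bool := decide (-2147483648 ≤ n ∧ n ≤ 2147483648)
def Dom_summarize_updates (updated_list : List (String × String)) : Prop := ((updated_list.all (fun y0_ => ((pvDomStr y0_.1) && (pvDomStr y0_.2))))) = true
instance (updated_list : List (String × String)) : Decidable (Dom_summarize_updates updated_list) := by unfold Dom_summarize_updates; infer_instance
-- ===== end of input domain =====

-- B replaces A's startswith-chain single pass by a per-bucket dict comprehension that
-- classifies each vid once via find("::") and a dispatch table (objective: alternative).

-- ===== PORT A =====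
def summarize_updates (updated_list : List (String × String)) : List (String × List String) :=
  let summary : PySem.Dict String (List String) := PySem.Dict.ofList
    [("narratives", []), ("rumors", []), ("injuries", []), ("athletes", []),
     ("events", []), ("upsets", []), ("country_upsets", [])]
  let final := updated_list.foldl (fun summary p =>
    let vid := p.1
    let action := p.2
    let record := vid ++ " (" ++ action ++ ")"
    if PySem.Str.startswith vid "athlete::" then summary.modify "athletes" [] (· ++ [record])
    else if PySem.Str.startswith vid "event::" then summary.modify "events" [] (· ++ [record])
    else if PySem.Str.startswith vid "country_upset::" then summary.modify "country_upsets" [] (· ++ [record])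
    else if PySem.Str.startswith vid "upset::" then summary.modify "upsets" [] (· ++ [record])
    else if PySem.Str.startswith vid "rumor::" then summary.modify "rumors" [] (· ++ [record])
    else if PySem.Str.startswith vid "injury::" then summary.modify "injuries" [] (· ++ [record])
    else summary.modify "narratives" [] (· ++ [record])) summary
  final.items

-- ===== PORT B =====
def pvDispatch : PySem.Dict String String := PySem.Dict.ofList
  [("athlete", "athletes"), ("event", "events"), ("country_upset", "country_upsets"),
   ("upset", "upsets"), ("rumor", "rumors"), ("injury", "injuries")]

def pvBucket (vid : String) : String :=
  let i := PySem.Str.find vid "::"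
  if 0 ≤ i then pvDispatch.getD (PySem.Str.slice vid none (some i)) "narratives"
  else "narratives"

def summarize_updates_alt (updated_list : List (String × String)) : List (String × List String) :=
  ["narratives", "rumors", "injuries", "athletes", "events", "upsets", "country_upsets"].map
    (fun key => (key,
      (updated_list.filter (fun p => pvBucket p.1 == key)).map
        (fun p => p.1 ++ " (" ++ p.2 ++ ")")))

-- ===== PRECONDITION & SPEC =====
def Spec_summarize_updates (updated_list : List (String × String)) (out : List (String × List String)) : Prop := out = summarize_updates_alt updated_list
instance (updated_list : List (String × String)) (out : List (String × List String)) : Decidable (Spec_summarize_updates updated_list out) := by unfold Spec_summarize_updates; infer_instance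

-- ===== CLAIM (what is proved, stated in full; the proofs are below) =====
def Claim_equal_summarize_updates : Prop := ∀ (updated_list : List (String × String)), Dom_summarize_updates updated_list → Spec_summarize_updates updated_list (summarize_updates updated_list)

-- ===== LEMMAS AND PROOFS =====

-- the 7 bucket keys, in A's fixed dict order
def pvKeys7 : List String :=
  ["narratives", "rumors", "injuries", "athletes", "events", "upsets", "country_upsets"]

-- A's branch chain, extracted as a key-choosing function
def pvChainKey (vid : String) : String :=
  if PySem.Str.startswith vid "athlete::" then "athletes"
  else if PySem.Str.startswith vid "event::" then "events"
  else if PySem.Str.startswith vid "country_upset::" then "country_upsets"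
  else if PySem.Str.startswith vid "upset::" then "upsets"
  else if PySem.Str.startswith vid "rumor::" then "rumors"
  else if PySem.Str.startswith vid "injury::" then "injuries"
  else "narratives"

-- for a token t free of ':', "t::" is a prefix of cs  iff  the first "::" of cs sits right after t
lemma pv_startswith_token (t cs : List Char) (ht : ':' ∉ t)
    (h0 : 0 ≤ PySem.Chars.find cs [':', ':']) :
    (t ++ [':', ':'] <+: cs) ↔ cs.take (PySem.Chars.find cs [':', ':']).toNat = t := by
  obtain ⟨hpre, hmin⟩ := PySem.Chars.find_spec h0
  set n := (PySem.Chars.find cs [':', ':']).toNat with hn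
  constructor
  · intro h
    obtain ⟨r, hr⟩ := h
    have hlen_eq : t.length = n := by
      by_contra hne
      rcases Nat.lt_or_ge t.length n with hlt | hge
      · exact hmin t.length hlt (by
          refine ⟨r, ?_⟩
          rw [← hr, List.drop_append_of_le_length (by simp)]
          simp)
      · have hlt : n < t.length := lt_of_le_of_ne hge (Ne.symm hne)
        -- cs[n] is a char of t, but the first "::" starts at n, so cs[n] = ':'
        have hcs : cs = t ++ [':', ':'] ++ r := hr.symm
        have h1 : cs[n]? = t[n]? := by
          rw [hcs, List.append_assoc, List.getElem?_append_left (by omega)]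
        obtain ⟨r2, hr2⟩ := hpre
        have h2 : cs[n]? = some ':' := by
          have hd : cs.drop n = [':', ':'] ++ r2 := hr2.symm
          have h3 : (cs.drop n)[0]? = some ':' := by rw [hd]; rfl
          rwa [List.getElem?_drop, Nat.add_zero] at h3
        rw [h1] at h2
        exact ht (List.mem_of_getElem? h2)
    rw [← hr, ← hlen_eq, List.append_assoc, List.take_left]
  · intro h
    obtain ⟨r2, hr2⟩ := hpre
    refine ⟨r2, ?_⟩
    calc t ++ [':', ':'] ++ r2 = cs.take n ++ cs.drop n := by rw [h, List.append_assoc, hr2]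
    _ = cs := List.take_append_drop n cs

-- if "::" never occurs in cs, no "t::" is a prefix of cs
lemma pv_no_token (t cs : List Char) (h : PySem.Chars.find cs [':', ':'] = -1) :
    ¬ (t ++ [':', ':'] <+: cs) := by
  intro hpre
  exact ((PySem.Chars.find_eq_neg_one_iff cs [':', ':']).mp h)
    (((List.suffix_append t [':', ':']).isInfix).trans hpre.isInfix)

-- A's branch chain chooses exactly B's bucket
set_option maxRecDepth 8192 in
lemma pv_key_eq (vid : String) : pvChainKey vid = pvBucket vid := by
  unfold pvChainKey pvBucket
  simp only [PySem.Str.startswith_eq, PySem.Str.find_eq]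
  have hpat : ("::" : String).toList = [':', ':'] := rfl
  rw [hpat]
  by_cases h0 : 0 ≤ PySem.Chars.find vid.toList [':', ':']
  · rw [if_pos h0]
    have hslice : (PySem.Str.slice vid none (some (PySem.Chars.find vid.toList [':', ':']))).toList
        = vid.toList.take (PySem.Chars.find vid.toList [':', ':']).toNat := by
      simp [PySem.Str.slice, PySem.List.slice_to _ h0]
    have hget : pvDispatch = PySem.Dict.mk
      [("athlete", "athletes"), ("event", "events"), ("country_upset", "country_upsets"),
       ("upset", "upsets"), ("rumor", "rumors"), ("injury", "injuries")] := by decide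
    rw [PySem.Dict.getD_eq_get?_getD, hget]
    simp only [PySem.Dict.get?_mk_cons, beq_iff_eq, ← String.toList_inj, hslice]
    have hsw : ∀ t : List Char, ':' ∉ t →
        PySem.Chars.startswith vid.toList (t ++ [':', ':'])
          = decide (vid.toList.take (PySem.Chars.find vid.toList [':', ':']).toNat = t) := by
      intro t ht
      by_cases hc : vid.toList.take (PySem.Chars.find vid.toList [':', ':']).toNat = t
      · have hb : PySem.Chars.startswith vid.toList (t ++ [':', ':']) = true :=
          (PySem.Chars.startswith_iff _ _).mpr ((pv_startswith_token t vid.toList ht h0).mpr hc)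
        rw [hb, decide_eq_true_eq.mpr hc]
      · have hb : PySem.Chars.startswith vid.toList (t ++ [':', ':']) = false := by
          cases hX : PySem.Chars.startswith vid.toList (t ++ [':', ':']) with
          | false => rfl
          | true => exact absurd ((pv_startswith_token t vid.toList ht h0).mp
              ((PySem.Chars.startswith_iff _ _).mp hX)) hc
        rw [hb, decide_eq_false hc]
    have e1 := hsw "athlete".toList (by decide)
    have e2 := hsw "event".toList (by decide)
    have e3 := hsw "country_upset".toList (by decide)
    have e4 := hsw "upset".toList (by decide)
    have e5 := hsw "rumor".toList (by decide)
    have e6 := hsw "injury".toList (by decide)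
    have t1 : ("athlete::" : String).toList = "athlete".toList ++ [':', ':'] := by decide
    have t2 : ("event::" : String).toList = "event".toList ++ [':', ':'] := by decide
    have t3 : ("country_upset::" : String).toList = "country_upset".toList ++ [':', ':'] := by decide
    have t4 : ("upset::" : String).toList = "upset".toList ++ [':', ':'] := by decide
    have t5 : ("rumor::" : String).toList = "rumor".toList ++ [':', ':'] := by decide
    have t6 : ("injury::" : String).toList = "injury".toList ++ [':', ':'] := by decide
    simp only [t1, t2, t3, t4, t5, t6, e1, e2, e3, e4, e5, e6]
    set w := vid.toList.take (PySem.Chars.find vid.toList [':', ':']).toNat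
    by_cases c1 : w = "athlete".toList <;> by_cases c2 : w = "event".toList <;>
      by_cases c3 : w = "country_upset".toList <;> by_cases c4 : w = "upset".toList <;>
      by_cases c5 : w = "rumor".toList <;> by_cases c6 : w = "injury".toList <;>
      simp_all [PySem.Dict.get?]
    rw [if_neg (fun hh => c1 hh.symm), if_neg (fun hh => c2 hh.symm),
      if_neg (fun hh => c3 hh.symm), if_neg (fun hh => c4 hh.symm),
      if_neg (fun hh => c5 hh.symm), if_neg (fun hh => c6 hh.symm)]
    rfl
  · rw [if_neg h0]
    have heq : PySem.Chars.find vid.toList [':', ':'] = -1 := by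
      have := PySem.Chars.neg_one_le_find vid.toList [':', ':']
      omega
    have hsw : ∀ t : List Char, PySem.Chars.startswith vid.toList (t ++ [':', ':']) = false := by
      intro t
      cases hX : PySem.Chars.startswith vid.toList (t ++ [':', ':']) with
      | false => rfl
      | true => exact absurd ((PySem.Chars.startswith_iff _ _).mp hX) (pv_no_token t vid.toList heq)
    have t1 : ("athlete::" : String).toList = "athlete".toList ++ [':', ':'] := by decide
    have t2 : ("event::" : String).toList = "event".toList ++ [':', ':'] := by decide
    have t3 : ("country_upset::" : String).toList = "country_upset".toList ++ [':', ':'] := by decide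
    have t4 : ("upset::" : String).toList = "upset".toList ++ [':', ':'] := by decide
    have t5 : ("rumor::" : String).toList = "rumor".toList ++ [':', ':'] := by decide
    have t6 : ("injury::" : String).toList = "injury".toList ++ [':', ':'] := by decide
    simp only [t1, t2, t3, t4, t5, t6, hsw]
    simp

lemma pv_bucket_mem (vid : String) : pvBucket vid ∈ pvKeys7 := by
  unfold pvKeys7
  by_cases h : 0 ≤ PySem.Str.find vid "::"
  all_goals simp only [pvBucket, h, if_pos, if_neg, not_false_iff]
  · have hget : pvDispatch = PySem.Dict.mk
      [("athlete", "athletes"), ("event", "events"), ("country_upset", "country_upsets"),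
       ("upset", "upsets"), ("rumor", "rumors"), ("injury", "injuries")] := by decide
    rw [PySem.Dict.getD_eq_get?_getD, hget]
    simp only [PySem.Dict.get?_mk_cons]
    split_ifs <;> simp [PySem.Dict.get?]
  · simp

lemma pv_set_update_self {s : PySem.Set String} (xs : List String)
    (h : ∀ x ∈ xs, x ∈ s) : PySem.Set.update s xs = s := by
  induction xs with
  | nil => rfl
  | cons y ys ih =>
    have hy : PySem.Set.add s y = s := by
      simp [PySem.Set.add, h y (by simp)]
    calc PySem.Set.update s (y :: ys) = PySem.Set.update (PySem.Set.add s y) ys := rfl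
    _ = PySem.Set.update s ys := by rw [hy]
    _ = s := ih (fun x hx => h x (by simp [hx]))

-- ===== VERDICT (by name: the statement is the Claim_ definition above) =====
theorem summarize_updates_spec : Claim_equal_summarize_updates := by
  intro l _
  unfold Spec_summarize_updates summarize_updates summarize_updates_alt
  simp only []
  set D0 : PySem.Dict String (List String) := PySem.Dict.ofList
    [("narratives", []), ("rumors", []), ("injuries", []), ("athletes", []),
     ("events", []), ("upsets", []), ("country_upsets", [])] with hD0
  -- step 1: replace A's branch chain by the bucket function
  have hstep : l.foldl (fun summary p =>
      let vid := p.1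
      let action := p.2
      let record := vid ++ " (" ++ action ++ ")"
      if PySem.Str.startswith vid "athlete::" then summary.modify "athletes" [] (· ++ [record])
      else if PySem.Str.startswith vid "event::" then summary.modify "events" [] (· ++ [record])
      else if PySem.Str.startswith vid "country_upset::" then summary.modify "country_upsets" [] (· ++ [record])
      else if PySem.Str.startswith vid "upset::" then summary.modify "upsets" [] (· ++ [record])
      else if PySem.Str.startswith vid "rumor::" then summary.modify "rumors" [] (· ++ [record])
      else if PySem.Str.startswith vid "injury::" then summary.modify "injuries" [] (· ++ [record])
      else summary.modify "narratives" [] (· ++ [record])) D0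
      = l.foldl (fun d p => d.modify (pvBucket p.1) [] (· ++ [p.1 ++ " (" ++ p.2 ++ ")"])) D0 := by
    apply PySem.List.foldl_congr_mem
    intro d p _
    rw [← pv_key_eq p.1]
    unfold pvChainKey
    dsimp only
    split_ifs <;> rfl
  rw [hstep]
  -- step 2: push the key function into the list, so the generic modify-append lemma applies
  have hmap : l.foldl (fun d p => d.modify (pvBucket p.1) [] (· ++ [p.1 ++ " (" ++ p.2 ++ ")"])) D0
      = (l.map (fun p => (pvBucket p.1, p.1 ++ " (" ++ p.2 ++ ")"))).foldl
          (fun d q => d.modify q.1 [] (· ++ [q.2])) D0 := by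
    rw [List.foldl_map]
  rw [hmap]
  set L := l.map (fun p => (pvBucket p.1, p.1 ++ " (" ++ p.2 ++ ")")) with hL
  set F := L.foldl (fun d q => d.modify q.1 [] (· ++ [q.2])) D0 with hF
  -- step 3: the keys never change
  have hkeys : F.keys = pvKeys7 := by
    rw [hF, PySem.Dict.keys_foldl_modify_key L (fun q => q.1) [] (fun _ q v => v ++ [q.2]) D0]
    have hD0keys : D0.keys = pvKeys7 := by decide
    rw [hD0keys]
    apply pv_set_update_self
    intro x hx
    rw [hL, List.map_map] at hx
    obtain ⟨p, _, hp⟩ := List.mem_map.mp hx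
    rw [← hp]
    exact pv_bucket_mem p.1
  have hnodup : F.keys.Nodup := by rw [hkeys]; decide
  -- step 4: items = map over the fixed key list, each entry given by the filter lemma
  rw [PySem.Dict.items_eq_map_keys F hnodup [], hkeys]
  show pvKeys7.map _ = pvKeys7.map _
  apply List.map_congr_left
  intro k hk
  have hgetD : F.getD k [] = D0.getD k [] ++ (L.filter (fun q => q.1 == k)).map (·.2) := by
    rw [hF]
    exact PySem.Dict.getD_foldl_modify_append L D0 k
  have hD0k : D0.getD k [] = [] := by
    unfold pvKeys7 at hk
    simp only [List.mem_cons, List.not_mem_nil, or_false] at hk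
    rcases hk with h|h|h|h|h|h|h <;> (subst h; decide)
  rw [hgetD, hD0k, List.nil_append, hL, List.filter_map, List.map_map]
  rfl
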